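-- pv_equiv track=rewrite | github.com/davidozhang/hackerrank | misc/shortest_palindrome.py | shortPalin
-- ===== SOURCE A (Python) =====
-- def isPalindrome(s):
--     return s==s[::-1]
--
-- def shortPalin(s):
--     if isPalindrome(s):
--         return 0
--     else:
--         temp = s
--         largest_common = 0
--         common = 0
--         while (len(temp) > 0):
--             for i in zip(list(temp), list(s[::-1])):
--                 if i[0] == i[1]:
--                     common += 1
--             if common > largest_common:
--                 largest_common = common
--             common = 0
--             temp = temp[1:]
--         return len(s) - largest_common
-- ===== SOURCE B (Python) =====
-- def shortPalin(s):
--     # Cross-correlation by character class: counts[d] = number of index pairs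
--     # (a, b) with a + b = d and s[a] == s[b]; the best shift match count of A
--     # is max(counts[n-1:]), and a palindrome gives counts[n-1] == n, so no
--     # separate palindrome check is needed.
--     n = len(s)
--     counts = [0] * (2 * n - 1)
--     for c in dict.fromkeys(s):
--         ps = [i for i, x in enumerate(s) if x == c]
--         for a in ps:
--             for b in ps:
--                 counts[a + b] += 1
--     best = max(counts[n - 1:], default=0)
--     return n - best
-- ===== Notes on version B (the rewrite author's own statement) =====
-- stated objective: faster
-- what changed: Instead of re-scanning every suffix of s against reversed(s) (one shift at a time), B buckets indices by character and fills a single cross-correlation histogram counts[a+b] over equal-character index pairs, whose tail maximum is the best shift match count; a palindrome makes counts[n-1]=n, so A's separate palindrome check disappears.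
import Mathlib
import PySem

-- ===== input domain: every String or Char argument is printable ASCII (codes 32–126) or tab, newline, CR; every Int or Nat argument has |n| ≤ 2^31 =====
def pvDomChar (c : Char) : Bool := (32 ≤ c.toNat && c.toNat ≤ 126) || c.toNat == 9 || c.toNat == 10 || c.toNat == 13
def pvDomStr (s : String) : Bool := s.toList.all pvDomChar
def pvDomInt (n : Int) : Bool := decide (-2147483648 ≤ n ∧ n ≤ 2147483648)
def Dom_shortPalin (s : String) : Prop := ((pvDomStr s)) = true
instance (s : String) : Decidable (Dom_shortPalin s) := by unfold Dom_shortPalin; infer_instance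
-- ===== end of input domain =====

-- B replaces A's per-shift rescan of every suffix against reversed(s) by a per-character
-- cross-correlation histogram counts[a+b] over equal-character index pairs; its tail maximum
-- is A's best shift match count, and a palindrome gives counts[n-1] = n, so A's separate
-- palindrome check disappears.

-- ===== PORT A =====

def pvIsPalindrome (l : List Char) : Bool := l = l.reverse

def pvCommonA (temp rev : List Char) : Int :=
  (temp.zip rev).foldl (fun common i => if i.1 = i.2 then common + 1 else common) 0

def pvLoopA (rev : List Char) : List Char → Int → Int
  | [], largest => largest
  | c :: t, largest =>
      let common := pvCommonA (c :: t) rev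
      pvLoopA rev t (if common > largest then common else largest)

def shortPalin (s : String) : Int :=
  let l := s.toList
  if pvIsPalindrome l then 0
  else (l.length : Int) - pvLoopA l.reverse l 0

-- ===== PORT B =====

def shortPalin_alt (s : String) : Int :=
  let l := s.toList
  let n := l.length
  let counts0 : List Int := List.replicate (2 * n - 1) 0
  let counts := (PySem.List.dedup l).foldl (fun cs c =>
      let ps := ((PySem.List.enumerate l).filter (fun p => p.2 = c)).map (fun p => p.1)
      ps.foldl (fun cs a =>
        ps.foldl (fun cs b =>
          PySem.List.pySetD cs (a + b) (PySem.List.pyGetD cs (a + b) 0 + 1)) cs) cs) counts0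
  let best := (PySem.List.max? (PySem.List.slice counts (some ((n : Int) - 1)) none) (fun x => x)).getD 0
  (n : Int) - best

-- ===== PRECONDITION & SPEC =====
def Spec_shortPalin (s : String) (out : Int) : Prop := out = shortPalin_alt s
instance (s : String) (out : Int) : Decidable (Spec_shortPalin s out) := by unfold Spec_shortPalin; infer_instance

-- ===== CLAIM (what is proved, stated in full; the proofs are below) =====
def Claim_equal_shortPalin : Prop := ∀ (s : String), Dom_shortPalin s → Spec_shortPalin s (shortPalin s)

-- ===== LEMMAS AND PROOFS =====

def pvCnt (l : List Char) (d : Nat) : Nat :=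
  (List.range l.length).countP
    (fun a => decide (a ≤ d) && decide (d - a < l.length) && (l.getD a ' ' == l.getD (d - a) ' '))

def pvPos (l : List Char) (c : Char) : List Nat :=
  (List.range l.length).filter (fun a => l.getD a ' ' == c)

def pvM (l : List Char) : List Int :=
  (List.range l.length).map (fun k => (pvCnt l (l.length - 1 + k) : Int))

theorem countP_flatMap_sum {α β : Type} (l : List α) (f : α → List β) (p : β → Bool) :
    (l.flatMap f).countP p = (l.map (fun a => (f a).countP p)).sum := by
  induction l with
  | nil => simp
  | cons x t ih => simp [List.flatMap_cons, List.countP_append, ih]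

theorem countP_or_disjoint {α : Type} (L : List α) (p q : α → Bool)
    (h : ∀ x ∈ L, ¬(p x = true ∧ q x = true)) :
    L.countP (fun x => p x || q x) = L.countP p + L.countP q := by
  induction L with
  | nil => simp
  | cons y t ih =>
    have hy := h y (by simp)
    have ht : ∀ x ∈ t, ¬(p x = true ∧ q x = true) := fun x hx => h x (by simp [hx])
    rw [List.countP_cons, List.countP_cons, List.countP_cons, ih ht]
    by_cases h1 : p y <;> by_cases h2 : q y
    · exact absurd ⟨h1, h2⟩ (h y (by simp))
    all_goals simp [h1, h2]
    all_goals omega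

-- disjoint-key sum: summing counts pinned to each key in a nodup list counts keys in the list

theorem sum_countP_key {α κ : Type} [DecidableEq κ] (cs : List κ) (hnd : cs.Nodup)
    (L : List α) (key : α → κ) (p : α → Bool) :
    (cs.map (fun c => L.countP (fun x => p x && decide (key x = c)))).sum
      = L.countP (fun x => p x && decide (key x ∈ cs)) := by
  induction cs with
  | nil => simp
  | cons c t ih =>
    simp only [List.map_cons, List.sum_cons, List.nodup_cons] at *
    rw [ih hnd.2]
    rw [← countP_or_disjoint L _ _ (by
      intro x _hx ⟨h1, h2⟩
      simp only [Bool.and_eq_true, decide_eq_true_eq] at h1 h2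
      exact hnd.1 (h1.2 ▸ h2.2))]
    apply List.countP_congr
    intro x _hx
    by_cases h1 : p x <;> by_cases h2 : key x = c <;> simp [h1, h2]

theorem sum_map_ite_mem {α : Type} (L : List α) (p : α → Bool) :
    (L.map (fun a => if p a then 1 else 0)).sum = L.countP p := by
  induction L with
  | nil => simp
  | cons y t ih => by_cases h : p y <;> simp [List.countP_cons, h, ih] <;> omega

theorem countP_zip_eq (xs ys : List Char) (p : Char × Char → Bool) :
    (xs.zip ys).countP p
      = (List.range (min xs.length ys.length)).countP
          (fun j => p (xs.getD j ' ', ys.getD j ' ')) := by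
  induction xs generalizing ys with
  | nil => simp
  | cons x xt ih =>
    cases ys with
    | nil => simp
    | cons y yt =>
      have hmin : min (xt.length + 1) (yt.length + 1) = min xt.length yt.length + 1 := by omega
      simp only [List.zip_cons_cons, List.countP_cons, List.length_cons, hmin,
        List.range_succ_eq_map, List.countP_map, List.getD_cons_zero, List.getD_cons_succ,
        Function.comp_def]
      rw [ih yt]

theorem cnt_shift (l : List Char) (k : Nat) (hk : k ≤ l.length) :
    pvCnt l (l.length - 1 + k)
      = (List.range (l.length - k)).countP
          (fun j => l.getD (k + j) ' ' == l.getD (l.length - 1 - j) ' ') := by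
  unfold pvCnt
  rw [show List.range l.length
        = List.range k ++ (List.range (l.length - k)).map (fun x => k + x) from by
      rw [← List.range_add]; congr 1; omega]
  rw [List.countP_append, List.countP_map]
  have h0 : (List.range k).countP
      (fun a => decide (a ≤ l.length - 1 + k) && decide (l.length - 1 + k - a < l.length) &&
        (l.getD a ' ' == l.getD (l.length - 1 + k - a) ' ')) = 0 := by
    rw [List.countP_eq_zero]
    intro a ha
    rw [List.mem_range] at ha
    have : ¬ (l.length - 1 + k - a < l.length) := by omega
    simp [this]
  rw [h0, Nat.zero_add]
  apply List.countP_congr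
  intro j hj
  rw [List.mem_range] at hj
  have h1 : k + j ≤ l.length - 1 + k := by omega
  have h2 : l.length - 1 + k - (k + j) < l.length := by omega
  have h3 : l.length - 1 + k - (k + j) = l.length - 1 - j := by omega
  have h4 : l.length - 1 - j < l.length := by omega
  simp [h1, h3, h4]

theorem commonA_eq (l : List Char) (k : Nat) (hk : k ≤ l.length) :
    pvCommonA (l.drop k) l.reverse = (pvCnt l (l.length - 1 + k) : Int) := by
  unfold pvCommonA
  rw [PySem.List.foldl_ite_add_one, Int.zero_add, cnt_shift l k hk, countP_zip_eq]
  norm_cast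
  rw [show min (l.drop k).length l.reverse.length = l.length - k from by simp]
  apply List.countP_congr
  intro j hj
  rw [List.mem_range] at hj
  have hd : (l.drop k).getD j ' ' = l.getD (k + j) ' ' := by
    simp [List.getD_eq_getElem?_getD, List.getElem?_drop]
  have hr : l.reverse.getD j ' ' = l.getD (l.length - 1 - j) ' ' := by
    have hjl : j < l.length := by omega
    rw [List.getD_eq_getElem?_getD, List.getD_eq_getElem?_getD,
      List.getElem?_reverse hjl]
  rw [hd, hr]
  simp

theorem loopA_eq (l : List Char) (m k : Nat) (hm : m + k = l.length) (L : Int) :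
    pvLoopA l.reverse (l.drop k) L = ((pvM l).drop k).foldl max L := by
  induction m generalizing k L with
  | zero =>
    have h1 : l.drop k = [] := by rw [List.drop_eq_nil_iff]; omega
    have h2 : (pvM l).drop k = [] := by
      rw [List.drop_eq_nil_iff]; simp [pvM]; omega
    rw [h1, h2]; rfl
  | succ m ih =>
    have hk : k < l.length := by omega
    have hkM : k < (pvM l).length := by simp [pvM]; omega
    rw [List.drop_eq_getElem_cons hk, List.drop_eq_getElem_cons hkM]
    simp only [pvLoopA, List.foldl_cons]
    rw [← List.drop_eq_getElem_cons hk, commonA_eq l k (by omega)]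
    have hMk : (pvM l)[k] = (pvCnt l (l.length - 1 + k) : Int) := by
      simp [pvM]
    rw [hMk, show (if (pvCnt l (l.length - 1 + k) : Int) > L then (pvCnt l (l.length - 1 + k) : Int) else L) = max L (pvCnt l (l.length - 1 + k) : Int) from by omega]
    exact ih (k + 1) (by omega) _

theorem ps_eq (l : List Char) (c : Char) (s : Int) :
    (((PySem.List.enumerate l s).filter (fun p => decide (p.2 = c))).map (fun p => p.1))
      = (pvPos l c).map (fun (a : Nat) => s + (a : Int)) := by
  induction l generalizing s with
  | nil => simp [pvPos]
  | cons x t ih =>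
    rw [PySem.List.enumerate_cons]
    have hpos : pvPos (x :: t) c
        = (if x == c then [0] else []) ++ (pvPos t c).map Nat.succ := by
      unfold pvPos
      rw [show (x :: t).length = t.length + 1 from rfl, List.range_succ_eq_map,
        List.filter_cons, List.filter_map]
      by_cases h : x = c <;> simp [h, Function.comp_def]
    rw [hpos, List.filter_cons]
    by_cases h : x = c
    · simp only [h, decide_true, if_true, beq_self_eq_true, List.map_cons, List.map_append,
        List.map_map, Function.comp_def, List.singleton_append, ih (s + 1), List.cons.injEq]
      refine ⟨by simp, ?_⟩
      refine List.map_congr_left ?_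
      intro a _
      push_cast; ring
    · simp only [h, decide_false, Bool.false_eq_true, if_false, beq_iff_eq, if_neg h,
        List.nil_append, List.map_map, Function.comp_def, ih (s + 1)]
      refine List.map_congr_left ?_
      intro a _
      push_cast; ring

theorem getD_foldl_incr (J : List Nat) (cs : List Int) (d : Nat) (h : ∀ j ∈ J, j < cs.length) :
    (J.foldl (fun cs j => cs.set j (cs.getD j 0 + 1)) cs).getD d 0
      = cs.getD d 0 + (J.count d : Int) := by
  induction J generalizing cs with
  | nil => simp
  | cons j t ih =>
    rw [List.foldl_cons, ih _ (by intro x hx; rw [List.length_set]; exact h x (List.mem_cons_of_mem _ hx))]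
    have hj : j < cs.length := h j (by simp)
    rw [List.count_cons]
    by_cases hdj : j = d
    · subst hdj
      simp only [List.getD_eq_getElem?_getD, List.getElem?_set_self hj]
      simp
      push_cast; ring
    · simp only [List.getD_eq_getElem?_getD, List.getElem?_set_ne hdj]
      have hb : (d == j) = false := by simp [Ne.symm hdj]
      simp [hb, hdj]

theorem length_foldl_incr (J : List Nat) (cs : List Int) :
    (J.foldl (fun cs j => cs.set j (cs.getD j 0 + 1)) cs).length = cs.length := by
  induction J generalizing cs with
  | nil => rfl
  | cons j t ih => rw [List.foldl_cons, ih, List.length_set]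

theorem pos_nodup (l : List Char) (c : Char) : (pvPos l c).Nodup :=
  List.Nodup.filter _ (List.nodup_range)

def pvK (l : List Char) : List Nat :=
  (PySem.List.dedup l).flatMap
    (fun c => (pvPos l c).flatMap (fun a => (pvPos l c).map (fun b => a + b)))

theorem count_K_eq_cnt (l : List Char) (d : Nat) : (pvK l).count d = pvCnt l d := by
  unfold pvK
  rw [List.count_eq_countP, countP_flatMap_sum]
  have hinner : ∀ c, ((pvPos l c).flatMap (fun a => (pvPos l c).map (fun b => a + b))).countP (· == d)
      = (List.range l.length).countP (fun a =>
          (decide (a ≤ d) && decide (d - a < l.length) && (l.getD a ' ' == l.getD (d - a) ' '))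
          && decide (l.getD a ' ' = c)) := by
    intro c
    rw [countP_flatMap_sum]
    have hmapped : ∀ a : Nat, ((pvPos l c).map (fun b => a + b)).countP (· == d)
        = if decide (a ≤ d) && decide ((d - a) ∈ pvPos l c) then 1 else 0 := by
      intro a
      rw [List.countP_map]
      by_cases ha : a ≤ d
      · rw [List.countP_congr (q := fun b => b == d - a)
          (by intro b _; simp only [Function.comp_def, beq_iff_eq]; omega),
          ← List.count_eq_countP, List.Nodup.count (pos_nodup l c)]
        by_cases hm : (d - a) ∈ pvPos l c <;> simp [hm, ha]
      · rw [List.countP_congr (q := fun _ => false)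
          (by intro b _; simp only [Function.comp_def, beq_iff_eq]; simp; omega)]
        simp [ha]
    calc ((pvPos l c).map fun a => ((pvPos l c).map (fun b => a + b)).countP (· == d)).sum
        = ((pvPos l c).map fun a => if decide (a ≤ d) && decide ((d - a) ∈ pvPos l c) then 1 else 0).sum := by
          congr 1; exact List.map_congr_left (fun a _ => hmapped a)
      _ = (pvPos l c).countP (fun a => decide (a ≤ d) && decide ((d - a) ∈ pvPos l c)) :=
          sum_map_ite_mem _ _
      _ = _ := by
          unfold pvPos
          rw [List.countP_filter]
          apply List.countP_congr
          intro a ha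
          rw [List.mem_range] at ha
          have hga : l[a]? = some l[a] := List.getElem?_eq_getElem ha
          by_cases h1 : a ≤ d
          · by_cases h2 : d - a < l.length
            · have hgd : l[d - a]? = some l[d - a] := List.getElem?_eq_getElem h2
              by_cases h3 : l[a] = c
              · by_cases h4 : l[d - a] = c
                · simp [h1, h2, h3, h4, hga, hgd, List.mem_filter, List.mem_range]
                · have h4' : ¬ c = l[d - a] := fun h => h4 h.symm
                  simp [h1, h2, h3, h4, h4', hga, hgd, List.mem_filter, List.mem_range]
              · simp [h1, h2, h3, hga, hgd, List.mem_filter, List.mem_range]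
            · simp [h1, h2, hga, List.mem_filter, List.mem_range]
          · simp [h1]
  calc ((PySem.List.dedup l).map fun c =>
          ((pvPos l c).flatMap fun a => (pvPos l c).map fun b => a + b).countP (· == d)).sum
      = ((PySem.List.dedup l).map fun c => (List.range l.length).countP (fun a =>
          (decide (a ≤ d) && decide (d - a < l.length) && (l.getD a ' ' == l.getD (d - a) ' '))
          && decide (l.getD a ' ' = c))).sum := by
        congr 1; exact List.map_congr_left (fun c _ => hinner c)
    _ = (List.range l.length).countP (fun a =>
          (decide (a ≤ d) && decide (d - a < l.length) && (l.getD a ' ' == l.getD (d - a) ' '))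
          && decide (l.getD a ' ' ∈ PySem.List.dedup l)) :=
        sum_countP_key _ (PySem.List.nodup_dedup l) _ _ _
    _ = pvCnt l d := by
        unfold pvCnt
        apply List.countP_congr
        intro a ha
        rw [List.mem_range] at ha
        have hga : l[a]? = some l[a] := List.getElem?_eq_getElem ha
        have hmem : l[a] ∈ PySem.List.dedup l := by
          rw [PySem.List.mem_dedup]
          exact List.getElem_mem ha
        simp [hga, hmem]

theorem counts_eq (l : List Char) (cs0 : List Int) :
    ((PySem.List.dedup l).foldl (fun cs c =>
        let ps := ((PySem.List.enumerate l).filter (fun p => decide (p.2 = c))).map (fun p => p.1)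
        ps.foldl (fun cs a => ps.foldl (fun cs b =>
          PySem.List.pySetD cs (a + b) (PySem.List.pyGetD cs (a + b) 0 + 1)) cs) cs) cs0)
      = (pvK l).foldl (fun cs j => cs.set j (cs.getD j 0 + 1)) cs0 := by
  unfold pvK
  rw [List.foldl_flatMap]
  apply PySem.List.foldl_congr_mem
  intro cs c _
  rw [List.foldl_flatMap]
  show (((PySem.List.enumerate l).filter (fun p => decide (p.2 = c))).map (fun p => p.1)).foldl _ cs = _
  rw [ps_eq l c 0]
  have hcast : (pvPos l c).map (fun (a : Nat) => (0 : Int) + (a : Int))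
      = (pvPos l c).map (fun (a : Nat) => (a : Int)) :=
    List.map_congr_left (fun a _ => by ring)
  rw [hcast, List.foldl_map]
  apply PySem.List.foldl_congr_mem
  intro cs a _
  rw [List.foldl_map, List.foldl_map]
  apply PySem.List.foldl_congr_mem
  intro cs b _
  have : ((a : Int) + (b : Int)) = ((a + b : Nat) : Int) := by push_cast; ring
  rw [this, PySem.List.pySetD_natCast, PySem.List.pyGetD_natCast]

theorem foldl_max_const (t : List Int) (c : Int) (h : ∀ x ∈ t, x ≤ c) :
    t.foldl max c = c := by
  induction t with
  | nil => rfl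
  | cons x r ih =>
    rw [List.foldl_cons, max_eq_left (h x (by simp))]
    exact ih (fun y hy => h y (by simp [hy]))

theorem cnt_le (l : List Char) (d : Nat) : pvCnt l d ≤ l.length := by
  unfold pvCnt
  calc List.countP _ (List.range l.length) ≤ (List.range l.length).length :=
        List.countP_le_length
    _ = l.length := List.length_range

theorem cnt_palin (l : List Char) (hp : l = l.reverse) (h : l ≠ []) :
    pvCnt l (l.length - 1) = l.length := by
  refine Nat.le_antisymm (cnt_le l _) ?_
  unfold pvCnt
  have heach : ∀ a ∈ List.range l.length,
      (decide (a ≤ l.length - 1) && decide (l.length - 1 - a < l.length) &&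
        (l.getD a ' ' == l.getD (l.length - 1 - a) ' ')) = true := by
    intro a ha
    rw [List.mem_range] at ha
    have hn : 0 < l.length := List.length_pos_of_ne_nil h
    have h1 : a ≤ l.length - 1 := by omega
    have h2 : l.length - 1 - a < l.length := by omega
    have hga : l[a]? = some l[a] := List.getElem?_eq_getElem ha
    have hgd : l[l.length - 1 - a]? = some l[l.length - 1 - a] := List.getElem?_eq_getElem h2
    have heq : l[a] = l[l.length - 1 - a] := by
      have h3 : a < l.reverse.length := by simpa using ha
      calc l[a] = l.reverse[a]'h3 := List.getElem_of_eq hp ha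
        _ = l[l.length - 1 - a] := by rw [List.getElem_reverse]
    simp [h1, h2, hga, hgd, heq]
  rw [List.countP_eq_length.mpr heach, List.length_range]

theorem K_mem_lt (l : List Char) (j : Nat) (hj : j ∈ pvK l) : j < 2 * l.length - 1 := by
  unfold pvK at hj
  rw [List.mem_flatMap] at hj
  obtain ⟨c, _, hj⟩ := hj
  rw [List.mem_flatMap] at hj
  obtain ⟨a, ha, hj⟩ := hj
  rw [List.mem_map] at hj
  obtain ⟨b, hb, rfl⟩ := hj
  unfold pvPos at ha hb
  rw [List.mem_filter, List.mem_range] at ha hb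
  omega

theorem pvM_cons (l : List Char) (h : l ≠ []) :
    pvM l = (pvCnt l (l.length - 1) : Int)
      :: (List.range (l.length - 1)).map (fun k => (pvCnt l (l.length + k) : Int)) := by
  unfold pvM
  obtain ⟨m, hm⟩ : ∃ m, l.length = m + 1 :=
    ⟨l.length - 1, by have := List.length_pos_of_ne_nil h; omega⟩
  rw [hm, List.range_succ_eq_map, List.map_cons, List.map_map]
  congr 1
  apply List.map_congr_left
  intro k _
  simp only [Function.comp_def]
  congr 2
  omega

theorem alt_eq_pos (s : String) (h : s.toList ≠ []) :
    shortPalin_alt s = (s.toList.length : Int)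
      - ((List.range (s.toList.length - 1)).map
            (fun k => (pvCnt s.toList (s.toList.length + k) : Int))).foldl max
          (pvCnt s.toList (s.toList.length - 1) : Int) := by
  unfold shortPalin_alt
  dsimp only
  set l := s.toList with hl
  have hn : 0 < l.length := List.length_pos_of_ne_nil h
  rw [counts_eq l]
  set counts := (pvK l).foldl (fun cs j => cs.set j (cs.getD j 0 + 1))
      (List.replicate (2 * l.length - 1) (0 : Int)) with hcounts
  have hlen : counts.length = 2 * l.length - 1 := by
    rw [hcounts, length_foldl_incr, List.length_replicate]
  have hget : ∀ d, d < 2 * l.length - 1 → counts.getD d 0 = (pvCnt l d : Int) := by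
    intro d hd
    rw [hcounts, getD_foldl_incr _ _ _
      (fun j hj => by rw [List.length_replicate]; exact K_mem_lt l j hj)]
    rw [count_K_eq_cnt]
    simp [List.getD_eq_getElem?_getD, List.getElem?_replicate, hd]
  have hc1 : ((l.length : Int) - 1) = ((l.length - 1 : Nat) : Int) := by push_cast; omega
  rw [hc1, PySem.List.slice_from_natCast]
  have hdrop : counts.drop (l.length - 1) = pvM l := by
    apply List.ext_getElem
    · simp [hlen, pvM]; omega
    · intro i h1 h2
      rw [List.getElem_drop]
      have hi : i < l.length := by simp [hlen] at h1; omega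
      have hin : l.length - 1 + i < counts.length := by rw [hlen]; omega
      calc counts[l.length - 1 + i] = counts.getD (l.length - 1 + i) 0 :=
            (List.getD_eq_getElem counts 0 hin).symm
        _ = (pvCnt l (l.length - 1 + i) : Int) := hget _ (by omega)
        _ = (pvM l)[i] := by simp [pvM, hi]
  rw [hdrop, pvM_cons l h, PySem.List.max?_id_cons]
  rfl

theorem shortPalin_main (s : String) : shortPalin s = shortPalin_alt s := by
  by_cases hp : s.toList = s.toList.reverse
  · have hA : shortPalin s = 0 := by
      unfold shortPalin
      dsimp only
      rw [if_pos (show pvIsPalindrome s.toList = true from decide_eq_true hp)]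
    by_cases hnil : s.toList = []
    · rw [hA]
      rw [String.toList_eq_nil_iff.mp hnil]
      decide
    · rw [hA, alt_eq_pos s hnil]
      have hbest : ((List.range (s.toList.length - 1)).map
            (fun k => (pvCnt s.toList (s.toList.length + k) : Int))).foldl max
          (pvCnt s.toList (s.toList.length - 1) : Int) = (s.toList.length : Int) := by
        rw [cnt_palin s.toList hp hnil]
        apply foldl_max_const
        intro x hx
        rw [List.mem_map] at hx
        obtain ⟨k, _, rfl⟩ := hx
        exact_mod_cast cnt_le s.toList _
      rw [hbest]
      omega
  · have hnil : s.toList ≠ [] := fun he => hp (by rw [he]; rfl)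
    have hA : shortPalin s = (s.toList.length : Int) - pvLoopA s.toList.reverse s.toList 0 := by
      unfold shortPalin
      dsimp only
      rw [if_neg (show ¬ pvIsPalindrome s.toList = true from by
        unfold pvIsPalindrome; simpa using hp)]
    have hloop : pvLoopA s.toList.reverse s.toList 0 = (pvM s.toList).foldl max 0 := by
      have h0 := loopA_eq s.toList s.toList.length 0 (by omega) 0
      rwa [List.drop_zero, List.drop_zero] at h0
    rw [hA, hloop, alt_eq_pos s hnil, pvM_cons s.toList hnil,
      List.foldl_cons, max_eq_right (Int.natCast_nonneg _)]

-- ===== VERDICT (by name: the statement is the Claim_ definition above) =====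
theorem shortPalin_spec : Claim_equal_shortPalin := by
  intro s _
  unfold Spec_shortPalin
  exact shortPalin_main s
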